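-- pv_equiv track=rewrite | github.com/Jelmerro/NoLQR | NoLQR/util.py | interleave_codewords
-- ===== SOURCE A (Python) =====
-- def interleave_codewords(data_blocks, error_blocks):
--     """ Interleaves all the codeblocks
--
--     First the data codewords for each block are added as follows:
--     block 1 word 1
--     block 2 word 1
--     block 1 word 2
--     etc.
--     The length of the blocks is version depended,
--     and even in the same version there can be different sized blocks.
--     After all data blocks have been interleaved,
--     the same is done for all error blocks.
--     The error blocks will be added after all data blocks.
--     """
--     biggest_block = len(max(data_blocks, key=len))
--     output = ""
--     for i in range(0, biggest_block):
--         for block in data_blocks: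
--             if i < len(block):
--                 output += block[i]
--     biggest_block = len(max(error_blocks, key=len))
--     for i in range(0, biggest_block):
--         for block in error_blocks:
--             if i < len(block):
--                 output += block[i]
--     return output
-- ===== SOURCE B (Python) =====
-- def interleave_codewords(data_blocks, error_blocks):
--     def weave(blocks):
--         parts = []
--         cur = [b for b in blocks if b]
--         while cur:
--             parts.extend(b[0] for b in cur)
--             cur = [b[1:] for b in cur if len(b) > 1]
--         return "".join(parts)
--     return weave(data_blocks) + weave(error_blocks)
-- ===== Notes on version B (the rewrite author's own statement) =====
-- stated objective: alternative
-- what changed: B transposes each block list column by column (take all heads, then recurse on the tails of the still-nonempty blocks) and joins the collected codewords once, instead of A's bounds-checked indexing block[i] under a max-length counter loop with string +=.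
-- crash fix: On empty data_blocks or empty error_blocks A raises ValueError (max() of an empty sequence) while B returns the interleaving of whichever side is present (the empty string if both are empty). — e.g. on interleave_codewords([["ab"]], []): A raises ValueError, B returns "ab"
import Mathlib
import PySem

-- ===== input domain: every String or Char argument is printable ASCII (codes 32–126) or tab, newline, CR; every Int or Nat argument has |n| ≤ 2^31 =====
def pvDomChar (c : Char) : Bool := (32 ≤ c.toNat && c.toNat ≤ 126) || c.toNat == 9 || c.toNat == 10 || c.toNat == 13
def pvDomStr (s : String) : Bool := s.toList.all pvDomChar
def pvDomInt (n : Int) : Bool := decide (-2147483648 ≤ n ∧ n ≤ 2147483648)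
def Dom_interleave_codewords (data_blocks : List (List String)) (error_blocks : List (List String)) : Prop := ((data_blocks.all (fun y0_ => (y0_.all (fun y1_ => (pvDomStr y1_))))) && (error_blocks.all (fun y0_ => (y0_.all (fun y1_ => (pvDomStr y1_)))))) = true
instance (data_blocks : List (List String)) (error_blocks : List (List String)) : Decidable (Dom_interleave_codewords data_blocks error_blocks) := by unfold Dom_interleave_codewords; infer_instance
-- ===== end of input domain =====

-- B interleaves by repeatedly taking the heads of the still-nonempty blocks (a column-by-column
-- transpose) and joining the collected codewords, instead of A's bounds-checked indexing loop under
-- a max-length counter; same cost, no index arithmetic.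

-- ===== PORT A =====
-- len(max(blocks, key=len)); Python raises ValueError on an empty list (excluded by Pre_); there .getD [] yields 0.
def pvMaxLen (bs : List (List String)) : Nat :=
  ((PySem.List.max? bs (fun b => b.length)).getD []).length

-- 'range(0, biggest)' with biggest : Nat is List.range biggest; 'block[i]' is guarded by
-- 'i < len(block)', so it is exactly List.getD i "" (always in range, never the default).
-- output accumulates through the first double loop (data) and then the second (error).
def interleave_codewords (data_blocks : List (List String)) (error_blocks : List (List String)) : String :=
  (List.range (pvMaxLen error_blocks)).foldl
    (fun out i => error_blocks.foldl
      (fun out block => if i < block.length then out ++ block.getD i "" else out) out)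
    ((List.range (pvMaxLen data_blocks)).foldl
      (fun out i => data_blocks.foldl
        (fun out block => if i < block.length then out ++ block.getD i "" else out) out) "")

-- ===== PORT B =====
-- cur = [b[1:] for b in cur if len(b) > 1]
def pvNext (cur : List (List String)) : List (List String) :=
  (cur.filter (fun b => 1 < b.length)).map (fun b => b.drop 1)

lemma pvNext_cons (x : List String) (t : List (List String)) :
    pvNext (x :: t) = if 1 < x.length then x.drop 1 :: pvNext t else pvNext t := by
  by_cases h : 1 < x.length <;> simp [pvNext, h]

-- termination measure for the while loop: total size of cur
lemma pvNext_sum_le (l : List (List String)) :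
    ((pvNext l).map (fun b => b.length + 1)).sum ≤ (l.map (fun b => b.length + 1)).sum := by
  induction l with
  | nil => simp [pvNext]
  | cons x t ih =>
      rw [pvNext_cons]
      by_cases h : 1 < x.length
      · rw [if_pos h]
        simp only [List.map_cons, List.sum_cons]
        have hd : (x.drop 1).length = x.length - 1 := by simp
        omega
      · rw [if_neg h]
        simp only [List.map_cons, List.sum_cons]
        omega

lemma pvNext_sum_lt (l : List (List String)) (h : l ≠ []) :
    ((pvNext l).map (fun b => b.length + 1)).sum < (l.map (fun b => b.length + 1)).sum := by
  cases l with
  | nil => exact absurd rfl h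
  | cons x t =>
      have ht := pvNext_sum_le t
      rw [pvNext_cons]
      by_cases hx : 1 < x.length
      · rw [if_pos hx]
        simp only [List.map_cons, List.sum_cons]
        have hd : (x.drop 1).length = x.length - 1 := by simp
        omega
      · rw [if_neg hx]
        simp only [List.map_cons, List.sum_cons]
        omega

-- the while loop: collect the heads of cur, recurse on the shortened still-nonempty blocks
def pvWeave (cur : List (List String)) : List String :=
  if _h : cur = [] then []
  else cur.map (fun b => b.headD "") ++ pvWeave (pvNext cur)
termination_by (cur.map (fun b => b.length + 1)).sum
decreasing_by exact pvNext_sum_lt _ ‹_›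

def interleave_codewords_alt (data_blocks : List (List String)) (error_blocks : List (List String)) : String :=
  PySem.Str.join "" (pvWeave (data_blocks.filter (fun b => !b.isEmpty)))
    ++ PySem.Str.join "" (pvWeave (error_blocks.filter (fun b => !b.isEmpty)))

-- ===== PRECONDITION & SPEC =====
-- Python A raises ValueError (max() of an empty sequence) when data_blocks or error_blocks is empty;
-- exactly those inputs are excluded.
def Pre_interleave_codewords (data_blocks : List (List String)) (error_blocks : List (List String)) : Prop :=
  data_blocks ≠ [] ∧ error_blocks ≠ []
instance (data_blocks : List (List String)) (error_blocks : List (List String)) : Decidable (Pre_interleave_codewords data_blocks error_blocks) := by unfold Pre_interleave_codewords; infer_instance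

def pvWitness_interleave_codewords : List (List String) × List (List String) :=
  ([["ab", "cd"], ["ef"]], [["x"], ["y", "z"]])

-- On empty data_blocks or empty error_blocks A raises ValueError, while B returns the interleaving
-- of whichever side is present (the empty string if both are empty).
def Raises_interleave_codewords (data_blocks : List (List String)) (error_blocks : List (List String)) : Prop :=
  data_blocks = [] ∨ error_blocks = []
instance (data_blocks : List (List String)) (error_blocks : List (List String)) : Decidable (Raises_interleave_codewords data_blocks error_blocks) := by unfold Raises_interleave_codewords; infer_instance

def pvRaiseWitness_interleave_codewords : List (List String) × List (List String) := ([["ab"]], [])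
def pvRaiseWitnessOut_interleave_codewords : String := "ab"

def Spec_interleave_codewords (data_blocks : List (List String)) (error_blocks : List (List String)) (out : String) : Prop := out = interleave_codewords_alt data_blocks error_blocks
instance (data_blocks : List (List String)) (error_blocks : List (List String)) (out : String) : Decidable (Spec_interleave_codewords data_blocks error_blocks out) := by unfold Spec_interleave_codewords; infer_instance

-- ===== CLAIM (what is proved, stated in full; the proofs are below) =====
def Claim_equal_interleave_codewords : Prop := ∀ (data_blocks : List (List String)) (error_blocks : List (List String)), Dom_interleave_codewords data_blocks error_blocks → Pre_interleave_codewords data_blocks error_blocks → Spec_interleave_codewords data_blocks error_blocks (interleave_codewords data_blocks error_blocks)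

def Claim_raises_interleave_codewords : Prop := (∀ (data_blocks : List (List String)) (error_blocks : List (List String)), Dom_interleave_codewords data_blocks error_blocks → Raises_interleave_codewords data_blocks error_blocks → ¬ Pre_interleave_codewords data_blocks error_blocks) ∧ (Dom_interleave_codewords (pvRaiseWitness_interleave_codewords.1) (pvRaiseWitness_interleave_codewords.2) ∧ Raises_interleave_codewords (pvRaiseWitness_interleave_codewords.1) (pvRaiseWitness_interleave_codewords.2) ∧ interleave_codewords_alt (pvRaiseWitness_interleave_codewords.1) (pvRaiseWitness_interleave_codewords.2) = pvRaiseWitnessOut_interleave_codewords)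

-- ===== LEMMAS AND PROOFS =====

-- mathematical maximum block length
def pvML (bs : List (List String)) : Nat := bs.foldr (fun b m => max b.length m) 0

lemma pvML_cons (x : List String) (t : List (List String)) :
    pvML (x :: t) = max x.length (pvML t) := rfl

lemma pvML_ge (bs : List (List String)) (b : List String) (hb : b ∈ bs) : b.length ≤ pvML bs := by
  induction bs with
  | nil => cases hb
  | cons x t ih =>
      rw [pvML_cons]
      rcases List.mem_cons.1 hb with h | h
      · subst h; exact le_max_left _ _
      · exact le_trans (ih h) (le_max_right _ _)

lemma pvML_le (bs : List (List String)) (k : Nat) (h : ∀ b ∈ bs, b.length ≤ k) : pvML bs ≤ k := by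
  induction bs with
  | nil => simp [pvML]
  | cons x t ih =>
      rw [pvML_cons]
      exact max_le (h x (by simp)) (ih (fun b hb => h b (List.mem_cons_of_mem _ hb)))

lemma pvMaxLen_eq_pvML (bs : List (List String)) : pvMaxLen bs = pvML bs := by
  cases hm : PySem.List.max? bs (fun b => b.length) with
  | none =>
      have : bs = [] := (PySem.List.max?_eq_none_iff _ _).1 hm
      subst this; simp [pvMaxLen, hm, pvML]
  | some m =>
      have hmem : m ∈ bs := PySem.List.max?_mem hm
      have hmax : ∀ y ∈ bs, y.length ≤ m.length := PySem.List.max?_isMax hm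
      simp only [pvMaxLen, hm, Option.getD_some]
      exact le_antisymm (pvML_ge bs m hmem) (pvML_le bs m.length hmax)

lemma pvML_next (bs : List (List String)) : pvML (pvNext bs) = pvML bs - 1 := by
  induction bs with
  | nil => simp [pvML, pvNext]
  | cons x t ih =>
      rw [pvNext_cons, pvML_cons]
      by_cases h : 1 < x.length
      · rw [if_pos h, pvML_cons, ih]
        have hd : (x.drop 1).length = x.length - 1 := by simp
        omega
      · rw [if_neg h, ih]
        omega

lemma pvML_zero_nil (bs : List (List String)) (h : pvML bs = 0) (hne : ∀ b ∈ bs, b ≠ []) :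
    bs = [] := by
  cases bs with
  | nil => rfl
  | cons x t =>
      exfalso
      have hx : x.length ≤ 0 := h ▸ pvML_ge (x :: t) x (by simp)
      have hx0 : x = [] := by cases x with | nil => rfl | cons a l => simp at hx
      exact hne x (by simp) hx0

lemma pvNext_ne_nil_mem (bs : List (List String)) (b : List String) (hb : b ∈ pvNext bs) : b ≠ [] := by
  simp only [pvNext, List.mem_map, List.mem_filter] at hb
  obtain ⟨a, ⟨_, ha⟩, rfl⟩ := hb
  have h1 : 1 < a.length := by simpa using ha
  intro hnil
  have := congrArg List.length hnil
  simp at this; omega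

lemma pvJoin_cons (x : String) (xs : List String) :
    PySem.Str.join "" (x :: xs) = x ++ PySem.Str.join "" xs := by
  cases xs with
  | nil => simp [PySem.Str.join, PySem.Chars.join_singleton, PySem.Chars.join_nil]
  | cons b rest => simp [PySem.Str.join, PySem.Chars.join_cons_cons]

lemma pvJoin_append (xs ys : List String) :
    PySem.Str.join "" (xs ++ ys) = PySem.Str.join "" xs ++ PySem.Str.join "" ys := by
  induction xs with
  | nil => simp [PySem.Str.join, PySem.Chars.join_nil]
  | cons x t ih => simp [pvJoin_cons, ih, String.append_assoc]

-- column 0 of blocks that are all nonempty is exactly the list of heads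
lemma pv_head_col (bs : List (List String)) (hne : ∀ b ∈ bs, b ≠ []) (acc : String) :
    bs.foldl (fun out block => if 0 < block.length then out ++ block.getD 0 "" else out) acc
      = acc ++ PySem.Str.join "" (bs.map (fun b => b.headD "")) := by
  induction bs generalizing acc with
  | nil => simp [PySem.Str.join, PySem.Chars.join_nil]
  | cons x t ih =>
      have hx : x ≠ [] := hne x (by simp)
      have hlen : 0 < x.length := List.length_pos_iff.2 hx
      have hhead : x.getD 0 "" = x.headD "" := by
        cases x with
        | nil => simp at hlen
        | cons a l => simp
      simp only [List.foldl_cons, if_pos hlen, List.map_cons, pvJoin_cons, hhead]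
      rw [ih (fun b hb => hne b (List.mem_cons_of_mem _ hb))]
      rw [String.append_assoc]

-- shifting the column index down by one is stepping to pvNext
lemma pv_col_shift (bs : List (List String)) (i : Nat) (acc : String) :
    bs.foldl (fun out block => if i + 1 < block.length then out ++ block.getD (i + 1) "" else out) acc
      = (pvNext bs).foldl (fun out block => if i < block.length then out ++ block.getD i "" else out) acc := by
  induction bs generalizing acc with
  | nil => simp [pvNext]
  | cons x t ih =>
      rw [pvNext_cons]
      by_cases h2 : 1 < x.length
      · rw [if_pos h2]
        by_cases hi : i + 1 < x.length
        · have hi' : i < (x.drop 1).length := by rw [List.length_drop]; omega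
          have hget : (x.drop 1).getD i "" = x.getD (i + 1) "" := by
            rw [List.getD_eq_getElem?_getD, List.getD_eq_getElem?_getD, List.getElem?_drop,
              Nat.add_comm]
          rw [List.foldl_cons, List.foldl_cons, if_pos hi, if_pos hi', hget]
          exact ih _
        · have hi' : ¬ i < (x.drop 1).length := by rw [List.length_drop]; omega
          rw [List.foldl_cons, List.foldl_cons, if_neg hi, if_neg hi']
          exact ih _
      · rw [if_neg h2]
        have hi : ¬ i + 1 < x.length := by omega
        rw [List.foldl_cons, if_neg hi]
        exact ih _

-- empty blocks never contribute: the inner loop only sees the nonempty blocks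
lemma pv_filter_inner (bs : List (List String)) (i : Nat) (acc : String) :
    bs.foldl (fun out block => if i < block.length then out ++ block.getD i "" else out) acc
      = (bs.filter (fun b => !b.isEmpty)).foldl
          (fun out block => if i < block.length then out ++ block.getD i "" else out) acc := by
  induction bs generalizing acc with
  | nil => rfl
  | cons x t ih =>
      by_cases hx : x = []
      · subst hx
        simp only [List.filter_cons, List.isEmpty_nil, Bool.not_true, Bool.false_eq_true,
          if_false, List.foldl_cons, List.length_nil, if_neg (by omega : ¬ i < 0)]
        exact ih _
      · have hne : (!x.isEmpty) = true := by simp [hx]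
        simp only [List.filter_cons, hne, List.foldl_cons, if_true]
        exact ih _

lemma pvML_filter (bs : List (List String)) :
    pvML (bs.filter (fun b => !b.isEmpty)) = pvML bs := by
  induction bs with
  | nil => rfl
  | cons x t ih =>
      by_cases hx : x = []
      · subst hx
        simp [pvML_cons, ih]
      · have hne : (!x.isEmpty) = true := by simp [hx]
        simp [hne, pvML_cons, ih]

-- the main invariant: the counter loop over columns computes the weave
lemma pv_weave_eq (n : Nat) : ∀ (cur : List (List String)) (acc : String),
    (∀ b ∈ cur, b ≠ []) → pvML cur = n →
    (List.range n).foldl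
        (fun out i => cur.foldl
          (fun out block => if i < block.length then out ++ block.getD i "" else out) out) acc
      = acc ++ PySem.Str.join "" (pvWeave cur) := by
  induction n with
  | zero =>
      intro cur acc hne hml
      have : cur = [] := pvML_zero_nil cur hml hne
      subst this
      rw [pvWeave]
      simp [PySem.Str.join, PySem.Chars.join_nil]
  | succ n ih =>
      intro cur acc hne hml
      have hcur : cur ≠ [] := by
        intro h; subst h; simp [pvML] at hml
      rw [List.range_succ_eq_map, List.foldl_cons, List.foldl_map]
      rw [pv_head_col cur hne acc]
      rw [PySem.List.foldl_congr_mem (List.range n)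
        (fun (out : String) (i : Nat) => cur.foldl
          (fun out block => if i.succ < block.length then out ++ block.getD i.succ "" else out) out)
        (fun (out : String) (i : Nat) => (pvNext cur).foldl
          (fun out block => if i < block.length then out ++ block.getD i "" else out) out)
        _ (fun acc' i _ => pv_col_shift cur i acc')]
      rw [ih (pvNext cur) _ (fun b hb => pvNext_ne_nil_mem cur b hb)
        (by rw [pvML_next, hml]; omega)]
      conv_rhs => rw [pvWeave, dif_neg hcur]
      rw [pvJoin_append, String.append_assoc]

lemma pv_half (bs : List (List String)) (acc : String) :
    (List.range (pvMaxLen bs)).foldl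
        (fun out i => bs.foldl
          (fun out block => if i < block.length then out ++ block.getD i "" else out) out) acc
      = acc ++ PySem.Str.join "" (pvWeave (bs.filter (fun b => !b.isEmpty))) := by
  rw [PySem.List.foldl_congr_mem (List.range (pvMaxLen bs))
    (fun (out : String) (i : Nat) => bs.foldl
      (fun out block => if i < block.length then out ++ block.getD i "" else out) out)
    (fun (out : String) (i : Nat) => (bs.filter (fun b => !b.isEmpty)).foldl
      (fun out block => if i < block.length then out ++ block.getD i "" else out) out)
    acc (fun acc' i _ => pv_filter_inner bs i acc')]
  apply pv_weave_eq
  · intro b hb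
    have := (List.mem_filter.1 hb).2
    simpa using this
  · rw [pvML_filter, ← pvMaxLen_eq_pvML]

lemma pvWeave_nil : pvWeave [] = [] := by rw [pvWeave]; simp

-- ===== VERDICT (by name: the statement is the Claim_ definition above) =====
theorem interleave_codewords_spec : Claim_equal_interleave_codewords := by
  intro d e _ _
  unfold Spec_interleave_codewords interleave_codewords interleave_codewords_alt
  rw [pv_half d "", pv_half e]
  simp

theorem interleave_codewords_raises : Claim_raises_interleave_codewords := by
  unfold Claim_raises_interleave_codewords
  refine ⟨?_, by decide, Or.inr rfl, ?_⟩
  · intro d e _ hr hp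
    rcases hr with h | h
    · exact hp.1 h
    · exact hp.2 h
  · show interleave_codewords_alt [["ab"]] [] = "ab"
    have h1 : pvWeave [["ab"]] = ["ab"] := by
      rw [pvWeave]
      simp [pvNext, pvWeave_nil]
    unfold interleave_codewords_alt
    simp [h1, pvWeave_nil, PySem.Str.join, PySem.Chars.join_nil]

-- self-check: the crash witness indeed lies inside Raises_ and outside Pre_
theorem interleave_codewords_raise_witness_ok :
    ¬ Pre_interleave_codewords (pvRaiseWitness_interleave_codewords.1) (pvRaiseWitness_interleave_codewords.2) :=
  interleave_codewords_raises.1 _ _ (by decide) interleave_codewords_raises.2.2.1
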